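-- pv_equiv track=rewrite | github.com/TalentedProger/AGU_Schedule | scripts/init_cloud_db.py | convert_query_local
-- ===== SOURCE A (Python) =====
-- def convert_query_local(query: str) -> str:
--     """
--     Convert SQLite query syntax to PostgreSQL.
--     Local copy to avoid circular import issues.
--     """
--     result = []
--     param_count = 0
--     i = 0
--     while i < len(query):
--         if query[i] == '?':
--             param_count += 1
--             result.append(f'${param_count}')
--         else:
--             result.append(query[i])
--         i += 1
--     return ''.join(result)
-- ===== SOURCE B (Python) =====
-- def convert_query_local(query: str) -> str:
--     """
--     Convert SQLite query syntax to PostgreSQL.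
--     Local copy to avoid circular import issues.
--     """
--     parts = query.split('?')
--     out = parts[0]
--     n = 1
--     for part in parts[1:]:
--         out += f'${n}{part}'
--         n += 1
--     return out
-- ===== Notes on version B (the rewrite author's own statement) =====
-- stated objective: simpler
-- what changed: B replaces A's per-character while-loop with a counter and list-append by a single str.split on the placeholder character followed by rejoining the segments with incrementing $N tokens.
import Mathlib
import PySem

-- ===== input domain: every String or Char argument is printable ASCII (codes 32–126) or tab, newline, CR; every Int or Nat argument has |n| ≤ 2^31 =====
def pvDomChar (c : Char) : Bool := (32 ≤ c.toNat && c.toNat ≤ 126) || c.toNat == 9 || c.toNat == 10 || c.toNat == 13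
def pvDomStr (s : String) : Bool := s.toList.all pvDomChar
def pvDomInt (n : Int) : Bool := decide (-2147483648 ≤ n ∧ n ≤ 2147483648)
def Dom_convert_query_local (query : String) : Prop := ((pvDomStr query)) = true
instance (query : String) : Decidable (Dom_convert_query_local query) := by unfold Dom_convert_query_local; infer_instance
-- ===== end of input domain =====

-- B replaces A's per-character scan with a counter by split('?') + rejoin with incrementing $N; objective: simpler.

-- ===== PORT A =====
-- A's while loop over the characters, carrying param_count; result pieces are
-- concatenated as they are appended (''.join of the pieces).
def convertA_go (cs : List Char) (paramCount : Int) : List Char :=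
  match cs with
  | [] => []
  | c :: rest =>
    if c = '?' then
      ('$' :: (PySem.Int.toStr (paramCount + 1)).toList) ++ convertA_go rest (paramCount + 1)
    else
      c :: convertA_go rest paramCount

def convert_query_local (query : String) : String :=
  String.mk (convertA_go query.toList 0)

-- ===== PORT B =====
-- Source B: parts = query.split('?'); out = parts[0]; for part in parts[1:]: out += f'${n}{part}'; n += 1
def convert_query_local_alt (query : String) : String :=
  let parts : List (List Char) := PySem.Chars.splitOn query.toList ['?']
  let st := (parts.tail).foldl
      (fun (st : List Char × Int) part =>
        (st.1 ++ ('$' :: (PySem.Int.toStr st.2).toList) ++ part, st.2 + 1))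
      (parts.headD [], 1)
  String.mk st.1

-- ===== PRECONDITION & SPEC =====
def Spec_convert_query_local (query : String) (out : String) : Prop := out = convert_query_local_alt query
instance (query : String) (out : String) : Decidable (Spec_convert_query_local query out) := by unfold Spec_convert_query_local; infer_instance

-- ===== CLAIM (what is proved, stated in full; the proofs are below) =====
def Claim_equal_convert_query_local : Prop := ∀ (query : String), Dom_convert_query_local query → Spec_convert_query_local query (convert_query_local query)

-- ===== LEMMAS AND PROOFS =====

-- Simple structural splitter on '?', used only by the proofs.
def splitQ : List Char → List (List Char)
  | [] => [[]]
  | c :: rest =>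
    if c = '?' then [] :: splitQ rest
    else
      match splitQ rest with
      | p :: ps => (c :: p) :: ps
      | [] => [[c]]

theorem splitQ_ne_nil (l : List Char) : splitQ l ≠ [] := by
  cases l with
  | nil => simp [splitQ]
  | cons c rest =>
    simp only [splitQ]
    split
    · simp
    · cases h : splitQ rest <;> simp

theorem splitOn_go_eq (fuel : Nat) (l cur : List Char) (acc : List (List Char))
    (h : l.length ≤ fuel) :
    PySem.Chars.splitOn.go ['?'] fuel l cur acc
      = acc.reverse ++ (splitQ l).modifyHead (cur.reverse ++ ·) := by
  induction fuel generalizing l cur acc with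
  | zero =>
    have : l = [] := List.eq_nil_of_length_eq_zero (Nat.le_zero.mp h)
    subst this
    simp [PySem.Chars.splitOn.go, splitQ]
  | succ fuel ih =>
    cases l with
    | nil => simp [PySem.Chars.splitOn.go, splitQ]
    | cons c rest =>
      by_cases hc : c = '?'
      · subst hc
        have hpre : List.isPrefixOf ['?'] ('?' :: rest) = true := by
          simp [List.isPrefixOf]
        rw [PySem.Chars.splitOn.go]
        simp only [hpre, if_true]
        have hd : List.drop (['?'] : List Char).length ('?' :: rest) = rest := by simp
        rw [hd, ih rest [] (cur.reverse :: acc) (by simpa using Nat.le_of_succ_le_succ h)]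
        obtain ⟨p, ps, hps⟩ : ∃ p ps, splitQ rest = p :: ps := by
          cases hsp : splitQ rest with
          | nil => exact absurd hsp (splitQ_ne_nil rest)
          | cons p ps => exact ⟨p, ps, rfl⟩
        simp [splitQ, hps, List.modifyHead]
      · have hpre : List.isPrefixOf ['?'] (c :: rest) = false := by
          simp [List.isPrefixOf]
          exact fun h => absurd h.symm hc
        rw [PySem.Chars.splitOn.go]
        simp only [hpre, Bool.false_eq_true, if_false]
        rw [ih rest (c :: cur) acc (by simpa using Nat.le_of_succ_le_succ h)]
        obtain ⟨p, ps, hps⟩ : ∃ p ps, splitQ rest = p :: ps := by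
          cases hsp : splitQ rest with
          | nil => exact absurd hsp (splitQ_ne_nil rest)
          | cons p ps => exact ⟨p, ps, rfl⟩
        simp [splitQ, hc, hps, List.modifyHead]

theorem splitOn_eq_splitQ (l : List Char) :
    PySem.Chars.splitOn l ['?'] = splitQ l := by
  rw [PySem.Chars.splitOn, splitOn_go_eq (l.length + 1) l [] [] (Nat.le_succ _)]
  obtain ⟨p, ps, hps⟩ : ∃ p ps, splitQ l = p :: ps := by
    cases hsp : splitQ l with
    | nil => exact absurd hsp (splitQ_ne_nil l)
    | cons p ps => exact ⟨p, ps, rfl⟩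
  simp [hps, List.modifyHead]

-- Numbered rejoin of the tail segments, used only by the proofs.
def numb : List (List Char) → Int → List Char
  | [], _ => []
  | p :: ps, n => ('$' :: (PySem.Int.toStr n).toList) ++ p ++ numb ps (n + 1)

theorem convertA_go_eq (l : List Char) (n : Int) :
    convertA_go l n = (splitQ l).headD [] ++ numb (splitQ l).tail (n + 1) := by
  induction l generalizing n with
  | nil => simp [convertA_go, splitQ, numb]
  | cons c rest ih =>
    by_cases hc : c = '?'
    · subst hc
      obtain ⟨p, ps, hps⟩ : ∃ p ps, splitQ rest = p :: ps := by
        cases hsp : splitQ rest with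
        | nil => exact absurd hsp (splitQ_ne_nil rest)
        | cons p ps => exact ⟨p, ps, rfl⟩
      simp [convertA_go, splitQ, hps, numb, ih, List.append_assoc]
    · obtain ⟨p, ps, hps⟩ : ∃ p ps, splitQ rest = p :: ps := by
        cases hsp : splitQ rest with
        | nil => exact absurd hsp (splitQ_ne_nil rest)
        | cons p ps => exact ⟨p, ps, rfl⟩
      simp [convertA_go, splitQ, hc, hps, ih]

theorem foldl_numb (ps : List (List Char)) (acc : List Char) (n : Int) :
    (ps.foldl
      (fun (st : List Char × Int) part =>
        (st.1 ++ ('$' :: (PySem.Int.toStr st.2).toList) ++ part, st.2 + 1))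
      (acc, n)).1 = acc ++ numb ps n := by
  induction ps generalizing acc n with
  | nil => simp [numb]
  | cons p ps ih =>
    simp only [List.foldl_cons, numb]
    rw [ih]
    simp [List.append_assoc]

-- ===== VERDICT (by name: the statement is the Claim_ definition above) =====
theorem convert_query_local_spec : Claim_equal_convert_query_local := by
  intro query _
  unfold Spec_convert_query_local convert_query_local convert_query_local_alt
  rw [splitOn_eq_splitQ, convertA_go_eq]
  obtain ⟨p, ps, hps⟩ : ∃ p ps, splitQ query.toList = p :: ps := by
    cases hsp : splitQ query.toList with
    | nil => exact absurd hsp (splitQ_ne_nil _)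
    | cons p ps => exact ⟨p, ps, rfl⟩
  simp only [hps, List.headD_cons, List.tail_cons]
  rw [foldl_numb]
  norm_num
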